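-- pv_equiv track=rewrite | github.com/alegestor/Practicas-IA | Practica 5/planning_problem_pddl.py | group_dictionaries
-- ===== SOURCE A (Python) =====
-- def group_dictionaries(dictionaries):
--     if dictionaries is None:
--         dictionaries = []
--     if not isinstance(dictionaries,list):
--         dictionaries = [dictionaries]
--     dictionary_total = {}
--     for dictionary in dictionaries:
--         for key in dictionary.keys():
--             if key in dictionary_total:
--                 dictionary_total[key].update(dictionary[key])
--             else:
--                 dictionary_total[key] = dictionary[key]
--     return dictionary_total
-- ===== SOURCE B (Python) =====
-- def group_dictionaries(dictionaries):
--     if dictionaries is None: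
--         dictionaries = []
--     if not isinstance(dictionaries, list):
--         dictionaries = [dictionaries]
--     groups = {}
--     for dictionary in dictionaries:
--         for key, value in dictionary.items():
--             groups.setdefault(key, []).append(value)
--     result = {}
--     for key, values in groups.items():
--         acc = values[0]
--         for v in values[1:]:
--             acc.update(v)
--         result[key] = acc
--     return result
-- ===== Notes on version B (the rewrite author's own statement) =====
-- stated objective: alternative
-- what changed: Single merge-as-you-go dict loop replaced by a two-pass decomposition: first group all value sets per key with setdefault/append, then collapse each key's ordered list of sets into its first set via update.
import Mathlib
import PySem

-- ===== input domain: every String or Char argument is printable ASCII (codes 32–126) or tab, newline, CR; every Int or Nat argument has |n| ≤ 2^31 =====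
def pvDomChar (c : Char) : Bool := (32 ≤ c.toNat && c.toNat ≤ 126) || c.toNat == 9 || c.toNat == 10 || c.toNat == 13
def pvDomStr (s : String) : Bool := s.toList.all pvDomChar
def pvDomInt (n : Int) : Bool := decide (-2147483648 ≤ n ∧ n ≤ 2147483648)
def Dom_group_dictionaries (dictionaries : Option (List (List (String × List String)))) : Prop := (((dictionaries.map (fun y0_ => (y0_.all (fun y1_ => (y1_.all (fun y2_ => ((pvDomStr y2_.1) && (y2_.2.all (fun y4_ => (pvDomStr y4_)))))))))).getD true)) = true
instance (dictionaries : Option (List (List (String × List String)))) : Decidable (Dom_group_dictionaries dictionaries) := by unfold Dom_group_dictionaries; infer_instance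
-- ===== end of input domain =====

-- B replaces A's merge-as-you-go dict loop by a two-pass decomposition (group all value sets
-- per key, then collapse each key's list of sets); same cost, objective: alternative.
-- A (and B) mutate the value sets of the input dicts in place; the equivalence proved here is
-- about the RETURN value only.

-- input decoding shared by both ports: a Python dict[str, set[str]] argument arrives as an
-- association list; build the PySem.Dict / PySem.Set values exactly as Python's conversion does
def pvDictOf (dlist : List (String × List String)) : PySem.Dict String (List String) :=
  PySem.Dict.ofList (dlist.map (fun p => (p.1, PySem.Set.ofList p.2)))

-- ===== PORT A =====
def group_dictionaries (dictionaries : Option (List (List (String × List String)))) : List (String × List String) :=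
  let ds := dictionaries.getD []   -- 'if dictionaries is None: dictionaries = []'; the isinstance branch is unreachable under the argument's type
  let total := ds.foldl (fun (total : PySem.Dict String (List String)) dlist =>
      let d := pvDictOf dlist
      d.keys.foldl (fun total key =>
        if total.contains key then
          total.modify key [] (fun s => PySem.Set.update s (d.getD key []))
        else
          total.insert key (d.getD key [])) total)
    PySem.Dict.empty
  total.items

-- ===== PORT B =====
def pvMerge (values : List (List String)) : List String :=
  match values with
  | [] => []
  | v :: rest => rest.foldl (fun acc w => PySem.Set.update acc w) v

def group_dictionaries_alt (dictionaries : Option (List (List (String × List String)))) : List (String × List String) :=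
  let ds := dictionaries.getD []
  let groups := ds.foldl (fun (g : PySem.Dict String (List (List String))) dlist =>
      let d := pvDictOf dlist
      d.items.foldl (fun g kv => g.modify kv.1 [] (fun vs => vs ++ [kv.2])) g)
    PySem.Dict.empty
  let result := groups.items.foldl (fun (r : PySem.Dict String (List String)) kvs =>
      r.insert kvs.1 (pvMerge kvs.2)) PySem.Dict.empty
  result.items

-- ===== PRECONDITION & SPEC =====
def Spec_group_dictionaries (dictionaries : Option (List (List (String × List String)))) (out : List (String × List String)) : Prop := out = group_dictionaries_alt dictionaries
instance (dictionaries : Option (List (List (String × List String)))) (out : List (String × List String)) : Decidable (Spec_group_dictionaries dictionaries out) := by unfold Spec_group_dictionaries; infer_instance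

-- ===== CLAIM (what is proved, stated in full; the proofs are below) =====
def Claim_equal_group_dictionaries : Prop := ∀ (dictionaries : Option (List (List (String × List String)))), Dom_group_dictionaries dictionaries → Spec_group_dictionaries dictionaries (group_dictionaries dictionaries)

-- ===== LEMMAS AND PROOFS =====

-- A's merge step, as a function of one (key, value-set) pair
def pvStepA (t : PySem.Dict String (List String)) (kv : String × List String) : PySem.Dict String (List String) :=
  if t.contains kv.1 then t.modify kv.1 [] (fun s => PySem.Set.update s kv.2)
  else t.insert kv.1 kv.2

-- B's grouping step
def pvStepG (g : PySem.Dict String (List (List String))) (kv : String × List String) : PySem.Dict String (List (List String)) :=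
  g.modify kv.1 [] (fun vs => vs ++ [kv.2])

-- the dict A maintains, expressed from B's groups dict
def pvMkT (g : PySem.Dict String (List (List String))) : PySem.Dict String (List String) :=
  PySem.Dict.mk (g.items.map (fun kvs => (kvs.1, pvMerge kvs.2)))

-- iterating a dict's keys and looking each key up is iterating its items
theorem pv_foldl_getD {ν β : Type} (d : PySem.Dict String ν) (hn : d.keys.Nodup) (dflt : ν)
    (F : β → String → ν → β) (t : β) :
    d.keys.foldl (fun t k => F t k (d.getD k dflt)) t
      = d.items.foldl (fun t kv => F t kv.1 kv.2) t := by
  have hk : d.keys = d.items.map (fun p => p.1) := rfl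
  rw [hk, List.foldl_map]
  have aux : ∀ (l : List (String × ν)), (∀ kv ∈ l, kv ∈ d.items) → ∀ (t : β),
      l.foldl (fun t kv => F t kv.1 (d.getD kv.1 dflt)) t
        = l.foldl (fun t kv => F t kv.1 kv.2) t := by
    intro l
    induction l with
    | nil => intro _ t; rfl
    | cons kv l ih =>
      intro hmem t
      have h1 : d.getD kv.1 dflt = kv.2 :=
        PySem.Dict.getD_of_mem_items d (by exact hmem kv (by simp)) hn dflt
      simp only [List.foldl_cons, h1]
      exact ih (fun p hp => hmem p (by simp [hp])) _
  exact aux d.items (fun kv h => h) t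

theorem pv_merge_append (vs : List (List String)) (h : vs ≠ []) (v : List String) :
    pvMerge (vs ++ [v]) = PySem.Set.update (pvMerge vs) v := by
  cases vs with
  | nil => cases h rfl
  | cons v0 r => simp [pvMerge, List.foldl_append]

theorem pv_keys_mkT (g : PySem.Dict String (List (List String))) :
    (pvMkT g).keys = g.keys := by
  simp [pvMkT, PySem.Dict.keys, List.map_map, Function.comp_def]

theorem pv_contains_mkT (g : PySem.Dict String (List (List String))) (k : String) :
    (pvMkT g).contains k = g.contains k := by
  simp [pvMkT, PySem.Dict.contains, List.any_map, Function.comp_def]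

theorem pv_step (g : PySem.Dict String (List (List String))) (hn : g.keys.Nodup)
    (hne : ∀ kv ∈ g.items, kv.2 ≠ []) (kv : String × List String) :
    pvStepA (pvMkT g) kv = pvMkT (pvStepG g kv) := by
  obtain ⟨k, v⟩ := kv
  have hnT : (pvMkT g).keys.Nodup := by rw [pv_keys_mkT]; exact hn
  by_cases h : g.contains k = true
  · obtain ⟨vs, hvs⟩ : ∃ vs, g.get? k = some vs := by
      rw [PySem.Dict.contains_eq_isSome_get?] at h
      exact Option.isSome_iff_exists.mp h
    have hmem : (k, vs) ∈ g.items := PySem.Dict.mem_items_of_get?_eq_some g hvs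
    have hgetD : g.getD k [] = vs := PySem.Dict.getD_of_get?_eq_some g [] hvs
    have hvsne : vs ≠ [] := hne _ hmem
    have hmemT : (k, pvMerge vs) ∈ (pvMkT g).items := by
      simp only [pvMkT]
      exact List.mem_map.mpr ⟨(k, vs), hmem, rfl⟩
    have hgetT : (pvMkT g).getD k [] = pvMerge vs :=
      PySem.Dict.getD_of_mem_items _ hmemT hnT []
    simp only [pvStepA, pvStepG, PySem.Dict.modify, pv_contains_mkT, h, if_pos, hgetT, hgetD]
    apply PySem.Dict.ext
    rw [PySem.Dict.items_insert_of_contains _ _ (by rw [pv_contains_mkT]; exact h)]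
    show _ = (PySem.Dict.insert g k (vs ++ [v])).items.map (fun kvs => (kvs.1, pvMerge kvs.2))
    rw [PySem.Dict.items_insert_of_contains _ _ h]
    show ((g.items.map (fun kvs => (kvs.1, pvMerge kvs.2))).map _) = _
    rw [List.map_map, List.map_map]
    apply List.map_congr_left
    intro p hp
    by_cases hpk : p.1 = k
    · simp [hpk, pv_merge_append vs hvsne v]
    · simp [hpk]
  · have hcf : g.contains k = false := by simpa using h
    have hgD : g.getD k [] = [] := PySem.Dict.getD_of_not_contains g [] hcf
    simp only [pvStepA, pvStepG, PySem.Dict.modify, pv_contains_mkT, hcf, if_neg, hgD,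
      Bool.false_eq_true, not_false_iff, List.nil_append]
    apply PySem.Dict.ext
    rw [PySem.Dict.items_insert_of_not_contains _ _ (by rw [pv_contains_mkT]; exact hcf)]
    show _ = (PySem.Dict.insert g k [v]).items.map (fun kvs => (kvs.1, pvMerge kvs.2))
    rw [PySem.Dict.items_insert_of_not_contains _ _ hcf]
    simp [pvMkT, pvMerge]

theorem pv_main (L : List (String × List String)) (g : PySem.Dict String (List (List String)))
    (hn : g.keys.Nodup) (hne : ∀ kv ∈ g.items, kv.2 ≠ []) :
    L.foldl pvStepA (pvMkT g) = pvMkT (L.foldl pvStepG g) := by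
  induction L generalizing g with
  | nil => rfl
  | cons kv L ih =>
    simp only [List.foldl_cons]
    rw [pv_step g hn hne kv]
    apply ih
    · simpa [pvStepG, PySem.Dict.modify] using
        PySem.Dict.nodup_keys_insert g kv.1 (g.getD kv.1 [] ++ [kv.2]) hn
    · intro p hp
      simp only [pvStepG, PySem.Dict.modify] at hp
      rcases (PySem.Dict.mem_items_insert g kv.1 (g.getD kv.1 [] ++ [kv.2]) p).mp hp with h1 | h2
      · subst h1; simp
      · exact hne _ h2.1

-- A's outer double loop as a fold of pvStepA over the flattened (key, set) pairs
theorem pv_A_flat (ds : List (List (String × List String))) :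
    ∀ (t : PySem.Dict String (List String)),
    ds.foldl (fun total dlist =>
        (pvDictOf dlist).keys.foldl (fun total key =>
          if total.contains key then
            total.modify key [] (fun s => PySem.Set.update s ((pvDictOf dlist).getD key []))
          else
            total.insert key ((pvDictOf dlist).getD key [])) total) t
      = (ds.flatMap (fun dl => (pvDictOf dl).items)).foldl pvStepA t := by
  induction ds with
  | nil => intro t; rfl
  | cons dl ds ih =>
    intro t
    simp only [List.foldl_cons, List.flatMap_cons, List.foldl_append]
    rw [ih]
    congr 1
    exact pv_foldl_getD (pvDictOf dl) (PySem.Dict.nodup_keys_ofList _) []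
      (fun t k v => if t.contains k then t.modify k [] (fun s => PySem.Set.update s v)
                    else t.insert k v) t

-- B's grouping double loop as a fold of pvStepG over the same flattened pairs
theorem pv_B_flat (ds : List (List (String × List String))) :
    ∀ (g : PySem.Dict String (List (List String))),
    ds.foldl (fun g dlist =>
        (pvDictOf dlist).items.foldl (fun g kv => g.modify kv.1 [] (fun vs => vs ++ [kv.2])) g) g
      = (ds.flatMap (fun dl => (pvDictOf dl).items)).foldl pvStepG g := by
  induction ds with
  | nil => intro g; rfl
  | cons dl ds ih =>
    intro g
    simp only [List.foldl_cons, List.flatMap_cons, List.foldl_append]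
    rw [ih]
    rfl

-- the groups dict keeps nodup keys through the grouping fold
theorem pv_groups_nodup (L : List (String × List String)) :
    (L.foldl pvStepG PySem.Dict.empty).keys.Nodup := by
  have := PySem.Dict.nodup_keys_foldl_modify_key L (fun kv => kv.1) []
    (fun _ kv => fun vs => vs ++ [kv.2]) PySem.Dict.empty (by simp [PySem.Dict.keys_empty])
  simpa [pvStepG] using this

-- B's second pass over fresh distinct keys just maps pvMerge over the items
theorem pv_result (g : PySem.Dict String (List (List String))) (hn : g.keys.Nodup) :
    (g.items.foldl (fun (r : PySem.Dict String (List String)) kvs =>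
        r.insert kvs.1 (pvMerge kvs.2)) PySem.Dict.empty).items
      = g.items.map (fun kvs => (kvs.1, pvMerge kvs.2)) := by
  have := PySem.Dict.items_foldl_insert_fresh g.items (fun kvs => kvs.1)
    (fun kvs => pvMerge kvs.2) PySem.Dict.empty
    (fun a _ => PySem.Dict.contains_empty a.1) (by exact hn)
  simpa using this

-- ===== VERDICT (by name: the statement is the Claim_ definition above) =====
theorem group_dictionaries_spec : Claim_equal_group_dictionaries := by
  intro dictionaries _
  unfold Spec_group_dictionaries group_dictionaries group_dictionaries_alt
  simp only []
  rw [pv_A_flat, pv_B_flat]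
  have hA := pv_main (List.flatMap (fun dl => (pvDictOf dl).items) (dictionaries.getD []))
    PySem.Dict.empty (by simp [PySem.Dict.keys_empty]) (by intro kv h; cases h)
  have hempty : pvMkT PySem.Dict.empty = PySem.Dict.empty := rfl
  rw [hempty] at hA
  rw [hA, pv_result _ (pv_groups_nodup _)]
  rfl
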